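-- pv_equiv track=rewrite | github.com/munim1216/adventOfCode | day_4_part1.py | get_left_diagonal_arr
-- ===== SOURCE A (Python) =====
-- def get_left_diagonal_arr(array):
--     diag = []
--     for r in range(len(array)):
--         diag.append(left_diag(array, len(array) - r - 1, len(array) - 1, ""))
--
--     c = len(array) - 2
--     while c > -1:
--         diag.append(left_diag(array, len(array) - 1, c, ""))
--         c -= 1
--
--     return diag
--
-- def left_diag(array, r, c, diagonal_line):
--     if r > -1 and c > -1:
--         diagonal_line += array[r][c]
--         return left_diag(array, r - 1, c - 1, diagonal_line)
--     else:
--         return diagonal_line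
-- ===== SOURCE B (Python) =====
-- def get_left_diagonal_arr(array):
--     n = len(array)
--     order = list(range(0, -n, -1)) + list(range(1, n))
--     return ["".join(array[r][r - d] for r in range(n - 1, -1, -1) if 0 <= r - d < n)
--             for d in order]
-- ===== Notes on version B (the rewrite author's own statement) =====
-- stated objective: simpler
-- what changed: Replaces A's two families of recursive up-left diagonal walks (one recursion per start cell plus a while loop) by a single map over diagonal indices d = r - c in A's emission order, building each diagonal with one guarded descending row scan.
import Mathlib
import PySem

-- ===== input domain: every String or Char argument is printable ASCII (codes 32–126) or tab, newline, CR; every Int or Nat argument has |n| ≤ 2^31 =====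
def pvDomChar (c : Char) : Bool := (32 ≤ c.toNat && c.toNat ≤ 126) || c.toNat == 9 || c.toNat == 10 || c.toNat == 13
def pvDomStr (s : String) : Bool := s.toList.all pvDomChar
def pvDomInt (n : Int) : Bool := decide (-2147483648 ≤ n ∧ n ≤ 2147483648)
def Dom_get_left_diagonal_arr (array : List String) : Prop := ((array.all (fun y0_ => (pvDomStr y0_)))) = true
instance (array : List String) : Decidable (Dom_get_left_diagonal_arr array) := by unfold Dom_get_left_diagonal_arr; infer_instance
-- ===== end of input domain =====

-- B replaces A's two families of recursive diagonal walks by a single map over the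
-- diagonal indices d = r - c, gathering each diagonal with a guarded scan over the rows
-- (objective: simpler — shorter and loop-free of recursion, same cost).

-- ===== PORT A =====
-- left_diag(array, r, c, diagonal_line): recursive up-left walk collecting array[r][c]
def left_diag (array : List String) (r c : Int) (diagonal_line : String) : String :=
  if r > -1 ∧ c > -1 then
    left_diag array (r - 1) (c - 1)
      (diagonal_line.push
        ((PySem.Str.pyGet? ((PySem.List.pyGet? array r).getD "") c).getD ' '))
  else diagonal_line
termination_by (r + 1).toNat
decreasing_by omega

-- the 'while c > -1' loop of A, appending one diagonal per column
def pvWhileA (array : List String) (c : Int) (diag : List String) : List String :=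
  if c > -1 then
    pvWhileA array (c - 1)
      (diag ++ [left_diag array ((array.length : Int) - 1) c ""])
  else diag
termination_by (c + 1).toNat
decreasing_by omega

def get_left_diagonal_arr (array : List String) : List String :=
  let diag := (List.range array.length).foldl
    (fun acc (r : Nat) =>
      acc ++ [left_diag array ((array.length : Int) - (r : Int) - 1) ((array.length : Int) - 1) ""]) []
  pvWhileA array ((array.length : Int) - 2) diag

-- ===== PORT B =====
def get_left_diagonal_arr_alt (array : List String) : List String :=
  let n : Int := array.length
  let order := PySem.List.pyRange 0 (-n) (-1) ++ PySem.List.pyRange 1 n 1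
  order.map (fun d =>
    String.ofList ((PySem.List.pyRange (n - 1) (-1) (-1)).filterMap (fun r =>
      if 0 ≤ r - d ∧ r - d < n then
        some ((PySem.Str.pyGet? ((PySem.List.pyGet? array r).getD "") (r - d)).getD ' ')
      else none)))

-- ===== PRECONDITION & SPEC =====
-- A indexes array[r][c] for every 0 ≤ r,c < len(array); it raises IndexError exactly
-- when some row is shorter than len(array). Pre_ excludes exactly those inputs.
def Pre_get_left_diagonal_arr (array : List String) : Prop :=
  ∀ s ∈ array, (array.length : Int) ≤ PySem.Str.len s
instance (array : List String) : Decidable (Pre_get_left_diagonal_arr array) := by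
  unfold Pre_get_left_diagonal_arr; infer_instance

def pvWitness_get_left_diagonal_arr : List String := ["abc", "def", "ghi"]

def Spec_get_left_diagonal_arr (array : List String) (out : List String) : Prop := out = get_left_diagonal_arr_alt array
instance (array : List String) (out : List String) : Decidable (Spec_get_left_diagonal_arr array out) := by unfold Spec_get_left_diagonal_arr; infer_instance

-- ===== CLAIM (what is proved, stated in full; the proofs are below) =====
def Claim_equal_get_left_diagonal_arr : Prop := ∀ (array : List String), Dom_get_left_diagonal_arr array → Pre_get_left_diagonal_arr array → Spec_get_left_diagonal_arr array (get_left_diagonal_arr array)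

-- ===== LEMMAS AND PROOFS =====

-- the character A and B both read at (r, c) (default is never reached under Pre_,
-- but both ports use the same default, so the lemmas below need no side condition)
def pvCell (array : List String) (r c : Int) : Char :=
  (PySem.Str.pyGet? ((PySem.List.pyGet? array r).getD "") c).getD ' '

-- the list of characters A's left_diag collects
def pvWalk (array : List String) (r c : Int) : List Char :=
  if r > -1 ∧ c > -1 then pvCell array r c :: pvWalk array (r - 1) (c - 1) else []
termination_by (r + 1).toNat
decreasing_by omega

-- the guarded row scan B performs for diagonal d
def pvDiagB (array : List String) (d : Int) : List Char :=
  (PySem.List.pyRange ((array.length : Int) - 1) (-1) (-1)).filterMap (fun r =>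
    if 0 ≤ r - d ∧ r - d < (array.length : Int) then some (pvCell array r (r - d)) else none)

lemma pv_left_diag_toList (array : List String) :
    ∀ (k : Nat) (r c : Int) (s : String), (r + 1).toNat = k →
      (left_diag array r c s).toList = s.toList ++ pvWalk array r c := by
  intro k
  induction k with
  | zero =>
    intro r c s hk
    rw [left_diag, pvWalk]
    have : ¬ (r > -1 ∧ c > -1) := by omega
    simp [this]
  | succ k ih =>
    intro r c s hk
    rw [left_diag, pvWalk]
    by_cases h : r > -1 ∧ c > -1
    · rw [if_pos h, if_pos h, ih (r - 1) (c - 1) _ (by omega)]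
      simp [pvCell]
    · simp [h]

lemma pv_filterMap_nil_of_lt (array : List String) (d : Int) (r : Int) (h : r - d < 0) :
    (PySem.List.pyRange r (-1) (-1)).filterMap (fun x =>
      if 0 ≤ x - d ∧ x - d < (array.length : Int) then some (pvCell array x (x - d)) else none) = [] := by
  rw [List.filterMap_eq_nil_iff]
  intro x hx
  rw [PySem.List.mem_pyRange_neg_one] at hx
  have : ¬ (0 ≤ x - d ∧ x - d < (array.length : Int)) := by omega
  exact if_neg this

lemma pv_walk_eq_scan (array : List String) (d : Int) :
    ∀ (k : Nat) (r : Int), (r + 1).toNat = k → r - d < (array.length : Int) →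
      pvWalk array r (r - d) =
        (PySem.List.pyRange r (-1) (-1)).filterMap (fun x =>
          if 0 ≤ x - d ∧ x - d < (array.length : Int) then some (pvCell array x (x - d)) else none) := by
  intro k
  induction k with
  | zero =>
    intro r hk hlt
    rw [pvWalk, PySem.List.pyRange_neg_one_eq_nil (by omega)]
    have : ¬ (r > -1 ∧ r - d > -1) := by omega
    rw [if_neg this, List.filterMap_nil]
  | succ k ih =>
    intro r hk hlt
    rw [pvWalk, PySem.List.pyRange_neg_one_cons (by omega : (-1 : Int) < r)]
    by_cases h : r - d ≥ 0
    · have hg : r > -1 ∧ r - d > -1 := by omega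
      have hif : 0 ≤ r - d ∧ r - d < (array.length : Int) := by omega
      rw [if_pos hg, List.filterMap_cons, if_pos hif,
          show r - d - 1 = (r - 1) - d by ring, ih (r - 1) (by omega) (by omega)]
    · have hg : ¬ (r > -1 ∧ r - d > -1) := by omega
      simp only [hg, if_neg, not_false_iff]
      rw [List.filterMap_cons]
      have hif : ¬ (0 ≤ r - d ∧ r - d < (array.length : Int)) := by omega
      simp only [hif, if_neg, not_false_iff]
      rw [pv_filterMap_nil_of_lt array d (r - 1) (by omega)]

-- B's scan for diagonal d equals A's walk from the boundary start cell of that diagonal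
lemma pv_diagB_eq_walk (array : List String) (d : Int)
    (h : min ((array.length : Int) - 1) ((array.length : Int) - 1 + d) ≥ -1) :
    pvDiagB array d =
      pvWalk array (min ((array.length : Int) - 1) ((array.length : Int) - 1 + d))
        (min ((array.length : Int) - 1) ((array.length : Int) - 1 + d) - d) := by
  set n : Int := (array.length : Int) with hn
  set r0 : Int := min (n - 1) (n - 1 + d) with hr0
  have hr0le : r0 ≤ n - 1 := by omega
  have hr0d : r0 - d < n := by omega
  rw [pv_walk_eq_scan array d (r0 + 1).toNat r0 rfl hr0d]
  unfold pvDiagB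
  rw [← hn]
  have hsplit : PySem.List.pyRange (n - 1) (-1) (-1) =
      PySem.List.pyRange (n - 1) r0 (-1) ++ PySem.List.pyRange r0 (-1) (-1) := by
    rw [PySem.List.pyRange_neg_one_eq_reverse, PySem.List.pyRange_neg_one_eq_reverse,
        PySem.List.pyRange_neg_one_eq_reverse,
        show (-1 : Int) + 1 = 0 by norm_num,
        PySem.List.pyRange_one_append 0 (r0 + 1) (n - 1 + 1) (by omega) (by omega)]
    simp
  rw [hsplit, List.filterMap_append]
  have hpre : (PySem.List.pyRange (n - 1) r0 (-1)).filterMap (fun x =>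
      if 0 ≤ x - d ∧ x - d < n then some (pvCell array x (x - d)) else none) = [] := by
    rw [List.filterMap_eq_nil_iff]
    intro x hx
    rw [PySem.List.mem_pyRange_neg_one] at hx
    have : ¬ (0 ≤ x - d ∧ x - d < n) := by omega
    exact if_neg this
  rw [hpre, List.nil_append]

lemma pv_whileA_eq (array : List String) :
    ∀ (k : Nat) (c : Int) (diag : List String), (c + 1).toNat = k →
      pvWhileA array c diag =
        diag ++ (PySem.List.pyRange c (-1) (-1)).map
          (fun c' => left_diag array ((array.length : Int) - 1) c' "") := by
  intro k
  induction k with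
  | zero =>
    intro c diag hk
    rw [pvWhileA, PySem.List.pyRange_neg_one_eq_nil (by omega)]
    have : ¬ c > -1 := by omega
    simp [this]
  | succ k ih =>
    intro c diag hk
    rw [pvWhileA]
    have h : c > -1 := by omega
    simp only [h, if_pos]
    rw [ih (c - 1) _ (by omega), PySem.List.pyRange_neg_one_cons (by omega : (-1 : Int) < c)]
    simp

-- one string of A equals one string of B (generic in the start cell / diagonal index)
lemma pv_string_eq (array : List String) (d : Int)
    (h : min ((array.length : Int) - 1) ((array.length : Int) - 1 + d) ≥ -1) :
    left_diag array (min ((array.length : Int) - 1) ((array.length : Int) - 1 + d))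
        (min ((array.length : Int) - 1) ((array.length : Int) - 1 + d) - d) "" =
      String.ofList (pvDiagB array d) := by
  apply String.toList_inj.mp
  rw [pv_left_diag_toList array _ _ _ _ rfl, pv_diagB_eq_walk array d h]
  simp

theorem pv_main (array : List String) :
    get_left_diagonal_arr array = get_left_diagonal_arr_alt array := by
  simp only [get_left_diagonal_arr, get_left_diagonal_arr_alt]
  set n : Int := (array.length : Int) with hn
  rw [PySem.List.foldl_append_singleton_eq_map, List.nil_append,
      pv_whileA_eq array (n - 2 + 1).toNat (n - 2) _ rfl]
  show _ = (PySem.List.pyRange 0 (-n) (-1) ++ PySem.List.pyRange 1 n 1).map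
      (fun d => String.ofList (pvDiagB array d))
  rw [List.map_append]
  congr 1
  · -- first family: starts in the last column, d = -r for r = 0 .. n-1
    rw [PySem.List.pyRange_neg_one 0 (-n)]
    have hlen : (0 - -n).toNat = array.length := by omega
    rw [hlen, List.map_map]
    apply List.map_congr_left
    intro r hr
    rw [List.mem_range] at hr
    have hr' : (r : Int) < n := by omega
    have hmin : min (n - 1) (n - 1 + (0 - (r : Int))) = n - (r : Int) - 1 := by omega
    have := pv_string_eq array (0 - (r : Int)) (by omega)
    rw [hmin, show n - (r : Int) - 1 - (0 - (r : Int)) = n - 1 by ring] at this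
    simpa using this
  · -- second family: starts in the last row, d = n - 1 - c for c = n-2 .. 0
    rw [PySem.List.pyRange_neg_one (n - 2) (-1), PySem.List.pyRange_one 1 n]
    have hlen : (n - 2 - -1).toNat = (n - 1).toNat := by omega
    rw [hlen, List.map_map, List.map_map]
    apply List.map_congr_left
    intro k hk
    rw [List.mem_range] at hk
    have hk' : (k : Int) < n - 1 := by omega
    have hmin : min (n - 1) (n - 1 + (1 + (k : Int))) = n - 1 := by omega
    have := pv_string_eq array (1 + (k : Int)) (by omega)
    rw [hmin] at this
    have harg : n - 1 - (1 + (k : Int)) = n - 2 - (k : Int) := by omega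
    rw [harg] at this
    simpa using this

-- ===== VERDICT (by name: the statement is the Claim_ definition above) =====
theorem get_left_diagonal_arr_spec : Claim_equal_get_left_diagonal_arr := by
  intro array _ _
  exact pv_main array
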